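/-
  THE SHADOW LAYER AT THE START OF THE RUN, and after `run_ctors`.

  ProgX/Start.lean proves `start_covers : Covers (InitLive imageEnd len) mem₀`: EVERYTHING the initial shadow marks accessible is
  covered — the whole image INCLUDING ITS CODE, the input, the output AND the stack. That is the shadow's view. The PROOF's live set is
  smaller on purpose (every check site is justified by a named object, STRATEGY §1 CAVEAT):

      initialObjs len          [IN (200000H, len), OUT (400000H, 300000H)]        — no image byte, no stack byte
      start_shadowInv          `ShadowInv (initialObjs len) [] 800000H mem₀`      (`Covers.mono` from `start_covers`; the image and the
                               stack being accessible in the shadow is allowed: `ShadowOK` has no converse)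
      start_imageClean         the image's granules have shadow 0: what `__asan_register_globals` relies on
      registered_shadowInv     after `run_ctors` (a memory whose shadow is that of `registerMem mem₀ descs`):
                               `ShadowInv (globals ++ initialObjs len) [] 800000H mem₁` — the globals are objects now, and their red
                               zones, the text, the literal pools, the descriptors are in no object
-/
import ProgX.Start
import Asan.Stack
namespace ProgX
open X86 X86.User Asan

/-- The input buffer as an object. -/
def objIN (len : Nat) : Obj := ⟨0x200000, len, .input⟩

/-- The output buffer as an object: always the full 300000H bytes, whatever `cap`. -/
def objOUT : Obj := ⟨0x400000, 0x300000, .output⟩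

/-- **The live objects at the start of the run.** -/
def initialObjs (len : Nat) : List Obj := [objIN len, objOUT]

/-- The initial shadow is well formed: its bytes are 0, `len % 8` and FFH. -/
theorem start_shadowWF (im : Image) (c : Nat) (hc : c = 0 ∨ c = 3) (inp : List UInt8) : ShadowWF (startU im c inp).mem := by
  intro g hg
  rw [start_shadowOf im c hc inp g hg]
  unfold initShadow WFv
  split
  · decide
  · split
    · decide
    · split
      · decide
      · split
        · rw [UInt8.toNat_ofNat']
          omega
        · split
          · decide
          · decide

/-- **The image starts wholly accessible**: the granules of `[100000H, __image_end rounded up to 8)` have shadow 0. -/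
theorem start_imageClean (im : Image) (him : im.OK) (c : Nat) (hc : c = 0 ∨ c = 3) (inp : List UInt8) :
    Clean (startU im c inp).mem 0x100000 ((im.imageEnd + 7) / 8 * 8) := by
  have hend := him.end_le
  intro g hg1 hg2
  rw [start_shadowOf im c hc inp g (by omega)]
  unfold initShadow
  have b1 : ¬ (0x700000 ≤ 8 * g ∧ 8 * g < 0x800000) := by omega
  have b2 : ¬ (0x400000 ≤ 8 * g ∧ 8 * g < 0x700000) := by omega
  have b3 : ¬ (0x200000 ≤ 8 * g ∧ 8 * g / 8 * 8 + 8 ≤ 0x200000 + inp.length) := by omega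
  have b4 : ¬ (0x200000 ≤ 8 * g ∧ 8 * g / 8 * 8 < 0x200000 + inp.length) := by omega
  have b5 : 0x100000 ≤ 8 * g ∧ 8 * g < (im.imageEnd + 7) / 8 * 8 := by omega
  rw [if_neg b1, if_neg b2, if_neg b3, if_neg b4, if_pos b5]
  rfl

/-- **The stack starts clean.** -/
theorem start_stackClean (im : Image) (c : Nat) (hc : c = 0 ∨ c = 3) (inp : List UInt8) :
    StackClean (startU im c inp).mem 0x700000 0x800000 := by
  intro g hg1 hg2
  rw [start_shadowOf im c hc inp g (by omega)]
  unfold initShadow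
  have b1 : 0x700000 ≤ 8 * g ∧ 8 * g < 0x800000 := by omega
  rw [if_pos b1]
  rfl

/-- **`ShadowOK` of the initial objects**, from M5's cover of everything the initial shadow marks accessible. -/
theorem start_shadowOK (im : Image) (him : im.OK) (c : Nat) (hc : c = 0 ∨ c = 3) (inp : List UInt8)
    (hlen : inp.length ≤ 0x1FF000) : ShadowOK (initialObjs inp.length) (startU im c inp).mem := by
  refine ⟨start_shadowWF im c hc inp, ?_, ?_⟩
  · apply (start_covers im him c hc inp hlen).mono
    intro a ha
    obtain ⟨o, ho, hb⟩ := ha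
    unfold initialObjs at ho
    simp only [List.mem_cons, List.not_mem_nil, or_false] at ho
    unfold InitLive
    rcases ho with rfl | rfl
    · unfold Obj.Bytes objIN at hb
      simp only at hb
      omega
    · unfold Obj.Bytes objOUT at hb
      simp only at hb
      omega
  · unfold initialObjs
    refine List.pairwise_cons.mpr ⟨?_, List.pairwise_cons.mpr ⟨?_, List.Pairwise.nil⟩⟩
    · intro o ho
      simp only [List.mem_cons, List.not_mem_nil, or_false] at ho
      subst ho
      unfold GranDisj Obj.gLo Obj.gHi objIN objOUT
      simp only
      omega
    · intro o ho
      simp only [List.not_mem_nil] at ho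

/-- **THE SHADOW LAYER AT THE START**: IN and OUT live, no protected frame, the whole stack clean below RSP0 = 800000H, sealed. -/
theorem start_shadowInv (im : Image) (him : im.OK) (c : Nat) (hc : c = 0 ∨ c = 3) (inp : List UInt8)
    (hlen : inp.length ≤ 0x1FF000) : ShadowInv (initialObjs inp.length) [] 0x800000 (startU im c inp).mem := by
  refine ⟨start_shadowOK im him c hc inp hlen, ?_, ?_, start_sealed im him c hc inp hlen⟩
  · refine ⟨by omega, by omega, by omega, start_stackClean im c hc inp, ?_, ?_⟩
    · intro bF hbF
      simp only [List.not_mem_nil] at hbF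
    · intro g hg1 hg2 _
      omega
  · intro o ho
    unfold initialObjs at ho
    simp only [List.mem_cons, List.not_mem_nil, or_false] at ho
    unfold OffStack
    rcases ho with rfl | rfl
    · unfold objIN
      simp only
      omega
    · unfold objOUT
      simp only
      omega

/-- **AFTER `run_ctors`** (P1 of INVARIANTS §5): in any memory `mem'` whose shadow is that of `registerMem mem₀ descs` — what the contract
`runCtorsSpec` of Asan/Runtime.lean promises — the registered globals are live objects. Their slots lie in the image. -/
theorem registered_shadowInv (im : Image) (him : im.OK) (c : Nat) (hc : c = 0 ∨ c = 3) (inp : List UInt8)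
    (hlen : inp.length ≤ 0x1FF000) (ds : List GlobalDesc) (hok : ∀ d, d ∈ ds → d.OK)
    (himg : ∀ d, d ∈ ds → d.beg + d.sizeRz ≤ (im.imageEnd + 7) / 8 * 8)
    (hapart : ds.Pairwise GlobalDesc.Apart) (mem' : Mem)
    (he : Mem.EqOn 0xC00000 0xE00000 (registerMem (startU im c inp).mem ds) mem') :
    ShadowInv ((ds.map GlobalDesc.obj).reverse ++ initialObjs inp.length) [] 0x800000 mem' := by
  refine ShadowInv.untouched ?_ he
  refine (start_shadowInv im him c hc inp hlen).register ds hok ?_ hapart ?_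
  · intro d hd
    obtain ⟨d1, d2, d3, d4, d5⟩ := hok d hd
    exact (start_imageClean im him c hc inp).mono d4 (himg d hd)
  · intro d hd o ho
    obtain ⟨d1, d2, d3, d4, d5⟩ := hok d hd
    unfold initialObjs at ho
    simp only [List.mem_cons, List.not_mem_nil, or_false] at ho
    unfold GlobalDesc.Off Obj.gLo Obj.gHi
    rcases ho with rfl | rfl
    · unfold objIN
      simp only
      omega
    · unfold objOUT
      simp only
      omega

end ProgX
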